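-- pv_equiv track=rewrite | github.com/nace-martin/Project-RateEngine | scripts/build_reference_data_csvs.py | build_city_rows
-- ===== SOURCE A (Python) =====
-- CITY_LIMITS_BY_COUNTRY = {
--     "AU": 250,
--     "NZ": 100,
--     "PG": 400,
--     "FJ": None,
--     "SB": None,
--     "VU": None,
--     "WS": None,
--     "TO": None,
--     "KI": None,
--     "FM": None,
--     "MH": None,
--     "PW": None,
--     "NR": None,
--     "TV": None,
--     "BN": None,
--     "KH": 120,
--     "ID": 250,
--     "LA": None,
--     "MY": 120,
--     "MM": 150,
--     "PH": 200,
--     "SG": None,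
--     "TH": 150,
--     "TL": None,
--     "VN": 150,
--     "CN": 300,
--     "KR": 120,
--     "JP": 180,
--     "IN": None,
--     "GB": 250,
--     "NL": 120,
--     "DE": 250,
-- }
--
-- INDIA_MAIN_CITIES = {
--     "Ahmedabad",
--     "Bengaluru",
--     "Bangalore",
--     "Chennai",
--     "Delhi",
--     "New Delhi",
--     "Hyderabad",
--     "Kochi",
--     "Kolkata",
--     "Mumbai",
--     "Pune",
-- }
--
-- def build_city_rows(profile, selected_country_codes, geonames_cities, airport_cities):
--     city_rows = []
--
--     for country_code in selected_country_codes: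
--         selected = {}
--
--         for city_name in sorted(airport_cities.get(country_code, set())):
--             key = city_name.casefold()
--             selected[key] = {"country_code": country_code, "name": city_name}
--
--         if profile == "regional" and country_code == "IN":
--             for city in geonames_cities.get(country_code, []):
--                 if city["name"] in INDIA_MAIN_CITIES:
--                     selected.setdefault(
--                         city["name"].casefold(),
--                         {"country_code": country_code, "name": city["name"]},
--                     )
--         else:
--             city_limit = CITY_LIMITS_BY_COUNTRY.get(country_code)
--             city_candidates = geonames_cities.get(country_code, [])
--             if city_limit is None:
--                 iterator = city_candidates
--             else:
--                 iterator = city_candidates[:city_limit]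
--             for city in iterator:
--                 selected.setdefault(
--                     city["name"].casefold(),
--                     {"country_code": country_code, "name": city["name"]},
--                 )
--
--         city_rows.extend(sorted(selected.values(), key=lambda row: row["name"]))
--
--     city_rows.sort(key=lambda row: (row["country_code"], row["name"]))
--     return city_rows
-- ===== SOURCE B (Python) =====
-- CITY_LIMITS_BY_COUNTRY = {
--     "AU": 250, "NZ": 100, "PG": 400, "FJ": None, "SB": None, "VU": None,
--     "WS": None, "TO": None, "KI": None, "FM": None, "MH": None, "PW": None,
--     "NR": None, "TV": None, "BN": None, "KH": 120, "ID": 250, "LA": None,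
--     "MY": 120, "MM": 150, "PH": 200, "SG": None, "TH": 150, "TL": None,
--     "VN": 150, "CN": 300, "KR": 120, "JP": 180, "IN": None, "GB": 250,
--     "NL": 120, "DE": 250,
-- }
--
-- INDIA_MAIN_CITIES = {
--     "Ahmedabad", "Bengaluru", "Bangalore", "Chennai", "Delhi", "New Delhi",
--     "Hyderabad", "Kochi", "Kolkata", "Mumbai", "Pune",
-- }
--
--
-- def _candidate_names(profile, country_code, cities):
--     if profile == "regional" and country_code == "IN":
--         return [c["name"] for c in cities if c["name"] in INDIA_MAIN_CITIES]
--     limit = CITY_LIMITS_BY_COUNTRY.get(country_code)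
--     if limit is not None:
--         cities = cities[:limit]
--     return [c["name"] for c in cities]
--
--
-- def _chosen_names(profile, country_code, geonames_cities, airport_cities):
--     # airport spellings win; a casefold seen-set filters the geonames candidates
--     airports = sorted(airport_cities.get(country_code, set()))
--     seen = {n.casefold() for n in airports}
--     names = list(airports)
--     for name in _candidate_names(profile, country_code,
--                                  geonames_cities.get(country_code, [])):
--         key = name.casefold()
--         if key not in seen:
--             seen.add(key)
--             names.append(name)
--     return names
--
--
-- def _merge(xs, ys):
--     # merge two row lists already sorted by (country_code, name)
--     out = []
--     i = j = 0
--     while i < len(xs) and j < len(ys):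
--         if (ys[j]["country_code"], ys[j]["name"]) < (xs[i]["country_code"], xs[i]["name"]):
--             out.append(ys[j]); j += 1
--         else:
--             out.append(xs[i]); i += 1
--     out.extend(xs[i:])
--     out.extend(ys[j:])
--     return out
--
--
-- def build_city_rows(profile, selected_country_codes, geonames_cities, airport_cities):
--     out = []
--     for country_code in selected_country_codes:
--         block = [{"country_code": country_code, "name": n}
--                  for n in sorted(_chosen_names(profile, country_code,
--                                                geonames_cities, airport_cities))]
--         out = _merge(out, block)
--     return out
-- ===== Notes on version B (the rewrite author's own statement) =====
-- stated objective: alternative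
-- what changed: B drops A's per-country dict of row dicts and its two sorting passes: per country it dedupes geonames candidates against a casefold seen-set seeded with the sorted airport names, sorts only the resulting name list, and accumulates the output by an ordered two-pointer MERGE of the per-country sorted blocks, so there is no global sort and no dict at all.
import Mathlib
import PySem

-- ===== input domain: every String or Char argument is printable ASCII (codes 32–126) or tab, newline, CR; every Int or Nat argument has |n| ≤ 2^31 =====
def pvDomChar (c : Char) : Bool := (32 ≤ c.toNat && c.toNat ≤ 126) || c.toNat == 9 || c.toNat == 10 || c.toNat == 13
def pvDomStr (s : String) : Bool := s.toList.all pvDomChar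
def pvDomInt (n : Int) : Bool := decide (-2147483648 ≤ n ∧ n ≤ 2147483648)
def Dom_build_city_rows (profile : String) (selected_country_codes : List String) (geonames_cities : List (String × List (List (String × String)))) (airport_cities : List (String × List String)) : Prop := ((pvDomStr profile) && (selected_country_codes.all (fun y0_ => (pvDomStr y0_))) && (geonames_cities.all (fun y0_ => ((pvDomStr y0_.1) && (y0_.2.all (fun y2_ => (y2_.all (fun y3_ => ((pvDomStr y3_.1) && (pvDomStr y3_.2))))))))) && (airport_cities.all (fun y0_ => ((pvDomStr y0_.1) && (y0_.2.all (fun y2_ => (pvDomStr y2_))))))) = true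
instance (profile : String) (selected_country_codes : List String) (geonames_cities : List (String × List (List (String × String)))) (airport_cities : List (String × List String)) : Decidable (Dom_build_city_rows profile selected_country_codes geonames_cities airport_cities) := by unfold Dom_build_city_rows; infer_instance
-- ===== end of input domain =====

-- B replaces A's per-country dict of row dicts with its per-country sort plus a global sort by a
-- casefold seen-set dedupe and an ordered two-pointer merge of per-country sorted blocks (alternative
-- decomposition, same results on Pre_; not claimed faster).

-- ===== PORT A =====
def pvCityLimits : PySem.Dict String (Option Int) := PySem.Dict.mk
  [("AU", some 250), ("NZ", some 100), ("PG", some 400), ("FJ", none), ("SB", none),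
   ("VU", none), ("WS", none), ("TO", none), ("KI", none), ("FM", none), ("MH", none),
   ("PW", none), ("NR", none), ("TV", none), ("BN", none), ("KH", some 120),
   ("ID", some 250), ("LA", none), ("MY", some 120), ("MM", some 150), ("PH", some 200),
   ("SG", none), ("TH", some 150), ("TL", none), ("VN", some 150), ("CN", some 300),
   ("KR", some 120), ("JP", some 180), ("IN", none), ("GB", some 250), ("NL", some 120),
   ("DE", some 250)]

def pvIndiaMain : List String :=
  ["Ahmedabad", "Bengaluru", "Bangalore", "Chennai", "Delhi", "New Delhi",
   "Hyderabad", "Kochi", "Kolkata", "Mumbai", "Pune"]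

def build_city_rows (profile : String) (selected_country_codes : List String) (geonames_cities : List (String × List (List (String × String)))) (airport_cities : List (String × List String)) : List (List (String × String)) :=
  let city_rows := selected_country_codes.foldl (fun city_rows country_code =>
    let selected : PySem.Dict String (List (String × String)) :=
      (PySem.List.sorted ((PySem.Dict.mk airport_cities).getD country_code []) (fun n => n) false).foldl
        (fun sel city_name =>
          sel.insert (PySem.Str.lower city_name) [("country_code", country_code), ("name", city_name)])
        PySem.Dict.empty
    let selected :=
      if profile == "regional" && country_code == "IN" then
        ((PySem.Dict.mk geonames_cities).getD country_code []).foldl (fun sel city =>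
          let nm := (PySem.Dict.mk city).getD "name" ""
          if pvIndiaMain.contains nm then
            if sel.contains (PySem.Str.lower nm) then sel
            else sel.insert (PySem.Str.lower nm) [("country_code", country_code), ("name", nm)]
          else sel) selected
      else
        let city_limit := pvCityLimits.getD country_code none
        let city_candidates := (PySem.Dict.mk geonames_cities).getD country_code []
        let iterator := match city_limit with
          | none => city_candidates
          | some l => PySem.List.slice city_candidates none (some l)
        iterator.foldl (fun sel city =>
          let nm := (PySem.Dict.mk city).getD "name" ""
          if sel.contains (PySem.Str.lower nm) then sel
          else sel.insert (PySem.Str.lower nm) [("country_code", country_code), ("name", nm)]) selected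
    city_rows ++ PySem.List.sorted selected.values (fun row => (PySem.Dict.mk row).getD "name" "") false) []
  PySem.List.sorted2 city_rows (fun row => (PySem.Dict.mk row).getD "country_code" "")
    (fun row => (PySem.Dict.mk row).getD "name" "") false

-- ===== PORT B =====
def pvCandidateNames (profile country_code : String) (cities : List (List (String × String))) : List String :=
  if profile == "regional" && country_code == "IN" then
    (cities.filter (fun c => pvIndiaMain.contains ((PySem.Dict.mk c).getD "name" ""))).map
      (fun c => (PySem.Dict.mk c).getD "name" "")
  else
    let cities' := match pvCityLimits.getD country_code none with
      | none => cities
      | some l => PySem.List.slice cities none (some l)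
    cities'.map (fun c => (PySem.Dict.mk c).getD "name" "")

def pvChosenNames (profile country_code : String) (geonames_cities : List (String × List (List (String × String)))) (airport_cities : List (String × List String)) : List String :=
  let airports := PySem.List.sorted ((PySem.Dict.mk airport_cities).getD country_code []) (fun n => n) false
  ((pvCandidateNames profile country_code ((PySem.Dict.mk geonames_cities).getD country_code [])).foldl
      (fun (st : List String × PySem.Set String) name =>
        if st.2.contains (PySem.Str.lower name) then st
        else (st.1 ++ [name], st.2.add (PySem.Str.lower name)))
      (airports, PySem.Set.ofList (airports.map PySem.Str.lower))).1

def pvMergeRows : List (List (String × String)) → List (List (String × String)) → List (List (String × String))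
  | [], ys => ys
  | x :: xs, [] => x :: xs
  | x :: xs, y :: ys =>
    if (PySem.Dict.mk y).getD "country_code" "" < (PySem.Dict.mk x).getD "country_code" ""
       ∨ ((PySem.Dict.mk y).getD "country_code" "" = (PySem.Dict.mk x).getD "country_code" ""
          ∧ (PySem.Dict.mk y).getD "name" "" < (PySem.Dict.mk x).getD "name" "") then
      y :: pvMergeRows (x :: xs) ys
    else
      x :: pvMergeRows xs (y :: ys)

def build_city_rows_alt (profile : String) (selected_country_codes : List String) (geonames_cities : List (String × List (List (String × String)))) (airport_cities : List (String × List String)) : List (List (String × String)) :=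
  selected_country_codes.foldl (fun out country_code =>
    pvMergeRows out
      ((PySem.List.sorted (pvChosenNames profile country_code geonames_cities airport_cities) (fun n => n) false).map
        (fun n => [("country_code", country_code), ("name", n)]))) []

-- ===== PRECONDITION & SPEC =====
-- Pre_ excludes (a) inputs on which A raises KeyError: a geonames city dict that A actually reads
-- (all of a selected country's dicts in the regional-India branch, those inside the limit slice
-- otherwise) lacking the "name" key; and (b) inputs where a selected country's airport-city set
-- contains two distinct spellings with the same casefold, on which A's last-insert-wins pick is an
-- accidental tie-break of duplicate dict keys (B keeps both spellings there).
def Pre_build_city_rows (profile : String) (selected_country_codes : List String) (geonames_cities : List (String × List (List (String × String)))) (airport_cities : List (String × List String)) : Prop :=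
  ∀ country_code ∈ selected_country_codes,
    ((((PySem.Dict.mk airport_cities).getD country_code []).map PySem.Str.lower).Nodup) ∧
    ∀ city ∈ (if profile == "regional" && country_code == "IN" then
                (PySem.Dict.mk geonames_cities).getD country_code []
              else match pvCityLimits.getD country_code none with
                | none => (PySem.Dict.mk geonames_cities).getD country_code []
                | some l => PySem.List.slice ((PySem.Dict.mk geonames_cities).getD country_code []) none (some l)),
      (PySem.Dict.mk city).contains "name" = true
instance (profile : String) (selected_country_codes : List String) (geonames_cities : List (String × List (List (String × String)))) (airport_cities : List (String × List String)) : Decidable (Pre_build_city_rows profile selected_country_codes geonames_cities airport_cities) := by unfold Pre_build_city_rows; infer_instance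

def pvWitness_build_city_rows : String × List String × (List (String × List (List (String × String)))) × (List (String × List String)) :=
  ("regional", ["IN", "AU"], [("IN", [[("name", "Delhi")]])], [("AU", ["Sydney"])])

def Spec_build_city_rows (profile : String) (selected_country_codes : List String) (geonames_cities : List (String × List (List (String × String)))) (airport_cities : List (String × List String)) (out : List (List (String × String))) : Prop := out = build_city_rows_alt profile selected_country_codes geonames_cities airport_cities
instance (profile : String) (selected_country_codes : List String) (geonames_cities : List (String × List (List (String × String)))) (airport_cities : List (String × List String)) (out : List (List (String × String))) : Decidable (Spec_build_city_rows profile selected_country_codes geonames_cities airport_cities out) := by unfold Spec_build_city_rows; infer_instance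

-- ===== CLAIM (what is proved, stated in full; the proofs are below) =====
def Claim_equal_build_city_rows : Prop := ∀ (profile : String) (selected_country_codes : List String) (geonames_cities : List (String × List (List (String × String)))) (airport_cities : List (String × List String)), Dom_build_city_rows profile selected_country_codes geonames_cities airport_cities → Pre_build_city_rows profile selected_country_codes geonames_cities airport_cities → Spec_build_city_rows profile selected_country_codes geonames_cities airport_cities (build_city_rows profile selected_country_codes geonames_cities airport_cities)

-- ===== LEMMAS AND PROOFS =====

-- the row dict both programs build, from a (country_code, name) pair
def pvMk (p : String × String) : List (String × String) :=
  [("country_code", p.1), ("name", p.2)]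

theorem pvK1_mk (p : String × String) :
    (PySem.Dict.mk (pvMk p)).getD "country_code" "" = p.1 := rfl

theorem pvK2_mk (p : String × String) :
    (PySem.Dict.mk (pvMk p)).getD "name" "" = p.2 := rfl

-- dict whose values are the image of another dict's values
def pvMapV {κ ν ν' : Type} (f : ν → ν') (d : PySem.Dict κ ν) : PySem.Dict κ ν' :=
  PySem.Dict.mk (d.items.map (fun p => (p.1, f p.2)))

theorem pvMapV_empty {κ ν ν' : Type} (f : ν → ν') :
    pvMapV f (PySem.Dict.empty : PySem.Dict κ ν) = PySem.Dict.empty := rfl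

theorem pvContains_mapV {κ ν ν' : Type} [BEq κ] (f : ν → ν') (d : PySem.Dict κ ν) (k : κ) :
    (pvMapV f d).contains k = d.contains k := by
  simp [pvMapV, PySem.Dict.contains, List.any_map, Function.comp_def]

theorem pvInsert_mapV {κ ν ν' : Type} [BEq κ] (f : ν → ν') (d : PySem.Dict κ ν) (k : κ) (v : ν) :
    (pvMapV f d).insert k (f v) = pvMapV f (d.insert k v) := by
  unfold PySem.Dict.insert
  rw [pvContains_mapV]
  by_cases h : d.contains k = true
  · simp only [h, if_pos]
    unfold pvMapV
    simp only [List.map_map]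
    congr 1
    apply List.map_congr_left
    intro p _
    by_cases hp : (p.1 == k) = true <;> simp [Function.comp, hp]
  · simp only [h, Bool.false_eq_true, if_neg, not_false_eq_true]
    unfold pvMapV
    simp

theorem pvValues_mapV {κ ν ν' : Type} (f : ν → ν') (d : PySem.Dict κ ν) :
    (pvMapV f d).values = d.values.map f := by
  simp [pvMapV, PySem.Dict.values, List.map_map, Function.comp]

def pvRow (country_code name : String) : List (String × String) :=
  [("country_code", country_code), ("name", name)]

-- generic transport of a fold along pvMapV
theorem pvFold_rel {α ν ν' : Type} (f : ν → ν')
    (sA : PySem.Dict String ν' → α → PySem.Dict String ν')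
    (sB : PySem.Dict String ν → α → PySem.Dict String ν)
    (h : ∀ d x, sA (pvMapV f d) x = pvMapV f (sB d x)) :
    ∀ (l : List α) (d : PySem.Dict String ν),
      l.foldl sA (pvMapV f d) = pvMapV f (l.foldl sB d) := by
  intro l
  induction l with
  | nil => intro d; rfl
  | cons x xs ih => intro d; simp only [List.foldl_cons, h, ih]

-- A's per-country dict of name spellings (the value part of A's selected dict)
def pvChosen (profile country_code : String)
    (geonames_cities : List (String × List (List (String × String))))
    (airport_cities : List (String × List String)) : PySem.Dict String String :=
  (pvCandidateNames profile country_code ((PySem.Dict.mk geonames_cities).getD country_code [])).foldl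
    (fun d name => if d.contains (PySem.Str.lower name) then d else d.insert (PySem.Str.lower name) name)
    ((PySem.List.sorted ((PySem.Dict.mk airport_cities).getD country_code []) (fun n => n) false).foldl
      (fun d name => d.insert (PySem.Str.lower name) name) PySem.Dict.empty)

-- A's per-country selected dict is pvChosen with rows substituted for names
theorem pvSelected_eq (profile country_code : String)
    (geonames_cities : List (String × List (List (String × String))))
    (airport_cities : List (String × List String)) :
    (let selected : PySem.Dict String (List (String × String)) :=
      (PySem.List.sorted ((PySem.Dict.mk airport_cities).getD country_code []) (fun n => n) false).foldl
        (fun sel city_name =>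
          sel.insert (PySem.Str.lower city_name) [("country_code", country_code), ("name", city_name)])
        PySem.Dict.empty
     if profile == "regional" && country_code == "IN" then
        ((PySem.Dict.mk geonames_cities).getD country_code []).foldl (fun sel city =>
          let nm := (PySem.Dict.mk city).getD "name" ""
          if pvIndiaMain.contains nm then
            if sel.contains (PySem.Str.lower nm) then sel
            else sel.insert (PySem.Str.lower nm) [("country_code", country_code), ("name", nm)]
          else sel) selected
      else
        let city_limit := pvCityLimits.getD country_code none
        let city_candidates := (PySem.Dict.mk geonames_cities).getD country_code []
        let iterator := match city_limit with
          | none => city_candidates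
          | some l => PySem.List.slice city_candidates none (some l)
        iterator.foldl (fun sel city =>
          let nm := (PySem.Dict.mk city).getD "name" ""
          if sel.contains (PySem.Str.lower nm) then sel
          else sel.insert (PySem.Str.lower nm) [("country_code", country_code), ("name", nm)]) selected)
    = pvMapV (pvRow country_code) (pvChosen profile country_code geonames_cities airport_cities) := by
  have hstep0 : ∀ (d : PySem.Dict String String) (n : String),
      (pvMapV (pvRow country_code) d).insert (PySem.Str.lower n)
        [("country_code", country_code), ("name", n)]
      = pvMapV (pvRow country_code) (d.insert (PySem.Str.lower n) n) :=
    fun d n => pvInsert_mapV (pvRow country_code) d (PySem.Str.lower n) n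
  have hair :
      (PySem.List.sorted ((PySem.Dict.mk airport_cities).getD country_code []) (fun n => n) false).foldl
        (fun sel city_name =>
          sel.insert (PySem.Str.lower city_name) [("country_code", country_code), ("name", city_name)])
        PySem.Dict.empty
      = pvMapV (pvRow country_code)
          ((PySem.List.sorted ((PySem.Dict.mk airport_cities).getD country_code []) (fun n => n) false).foldl
            (fun d name => d.insert (PySem.Str.lower name) name) PySem.Dict.empty) := by
    rw [← pvMapV_empty (pvRow country_code)]
    exact pvFold_rel (pvRow country_code) _ _ (fun d n => hstep0 d n) _ _
  show (if profile == "regional" && country_code == "IN" then _ else _) = _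
  unfold pvChosen pvCandidateNames
  by_cases h : (profile == "regional" && country_code == "IN") = true
  · simp only [h, if_pos]
    rw [List.foldl_map, List.foldl_filter, hair]
    apply pvFold_rel
    intro d c
    simp only [pvContains_mapV]
    split
    · split
      · rfl
      · exact pvInsert_mapV (pvRow country_code) d _ _
    · rfl
  · simp only [h, Bool.false_eq_true, if_neg, not_false_eq_true]
    rw [List.foldl_map, hair]
    apply pvFold_rel
    intro d c
    simp only [pvContains_mapV]
    split
    · rfl
    · exact pvInsert_mapV (pvRow country_code) d _ _

-- the geonames phase: A's dict setdefault loop and B's seen-set filter loop stay in lock step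
theorem pvCandSim (cands : List String) :
    ∀ (d : PySem.Dict String String) (names : List String) (seen : PySem.Set String),
      d.values = names → (∀ k, d.contains k = seen.contains k) →
      (cands.foldl (fun d name => if d.contains (PySem.Str.lower name) then d
          else d.insert (PySem.Str.lower name) name) d).values
        = (cands.foldl (fun (st : List String × PySem.Set String) name =>
            if st.2.contains (PySem.Str.lower name) then st
            else (st.1 ++ [name], st.2.add (PySem.Str.lower name))) (names, seen)).1 := by
  induction cands with
  | nil => intro d names seen hv _; simpa using hv
  | cons n cs ih =>
    intro d names seen hv hc
    rw [List.foldl_cons, List.foldl_cons]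
    cases hcase : seen.contains (PySem.Str.lower n) with
    | true =>
      simp only [hc, hcase, if_true]
      exact ih d names seen hv hc
    | false =>
      have hdc : d.contains (PySem.Str.lower n) = false := (hc _).trans hcase
      simp only [hc, hcase, Bool.false_eq_true, if_false]
      apply ih
      · show (d.insert (PySem.Str.lower n) n).values = names ++ [n]
        have hi := PySem.Dict.items_insert_of_not_contains d n hdc
        simp only [PySem.Dict.values] at hv ⊢
        rw [hi, List.map_append, hv]
        rfl
      · intro k
        rw [PySem.Dict.contains_insert, hc k]
        have hadd : (PySem.Set.add seen (PySem.Str.lower n)) = seen ++ [PySem.Str.lower n] := by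
          unfold PySem.Set.add
          rw [show PySem.Set.contains seen (PySem.Str.lower n) = false from hcase]
          simp
        show _ = PySem.Set.contains (PySem.Set.add seen (PySem.Str.lower n)) k
        rw [hadd]
        show _ = List.contains (seen ++ [PySem.Str.lower n]) k
        rw [List.contains_append]
        show (k == PySem.Str.lower n || List.contains seen k) = _
        rw [List.contains_cons]
        cases hk : (k == PySem.Str.lower n) <;> cases hs : List.contains seen k <;> simp_all

-- under Pre_ (no casefold collision among a country's airport names) A's per-country dict holds
-- exactly B's chosen-name list as its values
theorem pvChosen_values (profile country_code : String)
    (geonames_cities : List (String × List (List (String × String))))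
    (airport_cities : List (String × List String))
    (h : ((((PySem.Dict.mk airport_cities).getD country_code []).map PySem.Str.lower).Nodup)) :
    (pvChosen profile country_code geonames_cities airport_cities).values
      = pvChosenNames profile country_code geonames_cities airport_cities := by
  simp only [pvChosen, pvChosenNames]
  set l := PySem.List.sorted ((PySem.Dict.mk airport_cities).getD country_code []) (fun n => n) false with hl
  have hnd : (l.map PySem.Str.lower).Nodup := by
    have hperm : l.Perm ((PySem.Dict.mk airport_cities).getD country_code []) :=
      PySem.List.sorted_perm _ _ _
    exact ((hperm.map PySem.Str.lower).nodup_iff).mpr h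
  have hitems : ((l.foldl (fun d name => d.insert (PySem.Str.lower name) name) PySem.Dict.empty)).items
      = l.map (fun nn => (PySem.Str.lower nn, nn)) := by
    have := PySem.Dict.items_foldl_insert_fresh l PySem.Str.lower (fun nn => nn) PySem.Dict.empty
      (fun a _ => PySem.Dict.contains_empty _) hnd
    simpa using this
  have hvals : ((l.foldl (fun d name => d.insert (PySem.Str.lower name) name) PySem.Dict.empty)).values = l := by
    simp only [PySem.Dict.values, hitems, List.map_map]
    exact (List.map_congr_left (fun a _ => rfl)).trans (List.map_id l)
  have hcont : ∀ k, ((l.foldl (fun d name => d.insert (PySem.Str.lower name) name) PySem.Dict.empty)).contains k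
      = (PySem.Set.ofList (l.map PySem.Str.lower)).contains k := by
    intro k
    rw [Bool.eq_iff_iff]
    constructor
    · intro hk
      have := (PySem.Dict.contains_iff_mem_keys _ _).mp hk
      simp only [PySem.Dict.keys, hitems, List.map_map] at this
      have : k ∈ l.map PySem.Str.lower := by simpa [Function.comp] using this
      exact List.contains_iff_mem.mpr ((PySem.Set.mem_ofList _ _).mpr this)
    · intro hk
      have : k ∈ l.map PySem.Str.lower :=
        (PySem.Set.mem_ofList _ _).mp (List.contains_iff_mem.mp hk)
      apply (PySem.Dict.contains_iff_mem_keys _ _).mpr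
      simp only [PySem.Dict.keys, hitems, List.map_map]
      simpa [Function.comp] using this
  exact pvCandSim _ _ _ _ hvals hcont

-- the comparator of sorted2 (rfl names from the old representation)
def pvB {α : Type} (k1 k2 : α → String) (a b : α) : Bool :=
  decide (k1 a < k1 b) || (!decide (k1 b < k1 a) && decide (k2 a < k2 b))

theorem pvSorted2_eq_foldl {α : Type} (xs : List α) (k1 k2 : α → String) :
    PySem.List.sorted2 xs k1 k2 false
      = xs.foldl (fun acc x => PySem.List.insertBy (pvB k1 k2) x acc) [] := rfl

theorem pvInsertBy_cons {α : Type} (b : α → α → Bool) (x y : α) (ys : List α) :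
    PySem.List.insertBy b x (y :: ys)
      = if b x y then x :: y :: ys else y :: PySem.List.insertBy b x ys := rfl

-- insertion sort commutes with mapping, when the comparator only reads through the map
theorem pvInsertBy_map {α β : Type} (f : α → β) (b : β → β → Bool) (b' : α → α → Bool)
    (h : ∀ x y, b (f x) (f y) = b' x y) (x : α) :
    ∀ (l : List α), PySem.List.insertBy b (f x) (l.map f) = (PySem.List.insertBy b' x l).map f := by
  intro l
  induction l with
  | nil => rfl
  | cons y ys ih =>
    rw [List.map_cons, pvInsertBy_cons, pvInsertBy_cons, h]
    split
    · simp
    · simp [ih]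

theorem pvFoldl_insertBy_map {α β : Type} (f : α → β) (b : β → β → Bool) (b' : α → α → Bool)
    (h : ∀ x y, b (f x) (f y) = b' x y) :
    ∀ (l : List α) (acc : List α),
      (l.map f).foldl (fun a x => PySem.List.insertBy b x a) (acc.map f)
        = (l.foldl (fun a x => PySem.List.insertBy b' x a) acc).map f := by
  intro l
  induction l with
  | nil => intro acc; rfl
  | cons x xs ih =>
    intro acc
    rw [List.map_cons, List.foldl_cons, List.foldl_cons, pvInsertBy_map f b b' h x acc, ih]

theorem pvB_mk (p q : String × String) :
    pvB (fun row => (PySem.Dict.mk row).getD "country_code" "")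
        (fun row => (PySem.Dict.mk row).getD "name" "") (pvMk p) (pvMk q)
      = decide (toLex p < toLex q) := by
  unfold pvB
  simp only [pvK1_mk, pvK2_mk]
  rcases lt_trichotomy p.1 q.1 with h | h | h
  · simp [Prod.Lex.toLex_lt_toLex, h, asymm h]
  · simp [Prod.Lex.toLex_lt_toLex, h]
  · simp [Prod.Lex.toLex_lt_toLex, h, asymm h, h.ne']

theorem pvSorted2_map_toLex (S : List (String × String)) :
    PySem.List.sorted2 (S.map pvMk) (fun row => (PySem.Dict.mk row).getD "country_code" "")
        (fun row => (PySem.Dict.mk row).getD "name" "") false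
      = (PySem.List.sorted S (fun p => toLex p) false).map pvMk := by
  rw [pvSorted2_eq_foldl, PySem.List.sorted_eq_foldl_insertBy]
  exact pvFoldl_insertBy_map pvMk _ _ pvB_mk S []

theorem pvSorted_map_snd (P : List (String × String)) :
    PySem.List.sorted (P.map pvMk) (fun row => (PySem.Dict.mk row).getD "name" "") false
      = (PySem.List.sorted P (fun p => p.2) false).map pvMk := by
  rw [PySem.List.sorted_eq_foldl_insertBy, PySem.List.sorted_eq_foldl_insertBy]
  exact pvFoldl_insertBy_map pvMk _ _ (fun x y => by rw [pvK2_mk, pvK2_mk]) P []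

-- pair-level merge, with its transport to the row level
def pvMergeP : List (String × String) → List (String × String) → List (String × String)
  | [], ys => ys
  | x :: xs, [] => x :: xs
  | x :: xs, y :: ys =>
    if y.1 < x.1 ∨ (y.1 = x.1 ∧ y.2 < x.2) then y :: pvMergeP (x :: xs) ys
    else x :: pvMergeP xs (y :: ys)

theorem pvMergeRows_map : ∀ (P Q : List (String × String)),
    pvMergeRows (P.map pvMk) (Q.map pvMk) = (pvMergeP P Q).map pvMk := by
  intro P
  induction P with
  | nil => intro Q; cases Q <;> simp [pvMergeRows, pvMergeP]
  | cons x xs ihP =>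
    intro Q
    induction Q with
    | nil => simp [pvMergeRows, pvMergeP]
    | cons y ys ihQ =>
      simp only [List.map_cons, pvMergeRows, pvMergeP, pvK1_mk, pvK2_mk]
      split
      · have := ihQ
        simp only [List.map_cons] at this ⊢
        rw [this]
      · have := ihP (y :: ys)
        simp only [List.map_cons] at this ⊢
        rw [this]

theorem pvMergeP_perm : ∀ (P Q : List (String × String)), (pvMergeP P Q).Perm (P ++ Q) := by
  intro P
  induction P with
  | nil => intro Q; simp [pvMergeP]
  | cons x xs ihP =>
    intro Q
    induction Q with
    | nil => simp [pvMergeP]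
    | cons y ys ihQ =>
      rw [pvMergeP]
      split
      · exact (List.Perm.cons y ihQ).trans List.perm_middle.symm
      · exact (ihP (y :: ys)).cons x

theorem pvMergeP_pairwise : ∀ (P Q : List (String × String)),
    P.Pairwise (fun a b => toLex a ≤ toLex b) → Q.Pairwise (fun a b => toLex a ≤ toLex b) →
    (pvMergeP P Q).Pairwise (fun a b => toLex a ≤ toLex b) := by
  intro P
  induction P with
  | nil => intro Q h1 h2; simpa [pvMergeP] using h2
  | cons x xs ihP =>
    intro Q
    induction Q with
    | nil => intro h1 _; simpa [pvMergeP] using h1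
    | cons y ys ihQ =>
      intro h1 h2
      rcases List.pairwise_cons.mp h1 with ⟨hx, hxs⟩
      rcases List.pairwise_cons.mp h2 with ⟨hy, hys⟩
      rw [pvMergeP]
      split
      · rename_i hc
        have hyx : toLex y ≤ toLex x := le_of_lt (Prod.Lex.toLex_lt_toLex.mpr hc)
        refine List.pairwise_cons.mpr ⟨?_, ihQ h1 hys⟩
        intro z hz
        rcases List.mem_append.mp ((pvMergeP_perm (x :: xs) ys).mem_iff.mp hz) with hzx | hzy
        · rcases List.mem_cons.mp hzx with rfl | hz'
          · exact hyx
          · exact hyx.trans (hx z hz')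
        · exact hy z hzy
      · rename_i hc
        have hxy : toLex x ≤ toLex y := not_lt.mp (fun hlt => hc (Prod.Lex.toLex_lt_toLex.mp hlt))
        refine List.pairwise_cons.mpr ⟨?_, ihP (y :: ys) hxs h2⟩
        intro z hz
        rcases List.mem_append.mp ((pvMergeP_perm xs (y :: ys)).mem_iff.mp hz) with hzx | hzy
        · exact hx z hzx
        · rcases List.mem_cons.mp hzy with rfl | hz'
          · exact hxy
          · exact hxy.trans (hy z hz')

theorem pvFoldMerge (bl : String → List (String × String))
    (hbl : ∀ cc, (bl cc).Pairwise (fun a b => toLex a ≤ toLex b)) :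
    ∀ (codes : List String) (M : List (String × String)),
      M.Pairwise (fun a b => toLex a ≤ toLex b) →
      (codes.foldl (fun m cc => pvMergeP m (bl cc)) M).Pairwise (fun a b => toLex a ≤ toLex b) ∧
      (codes.foldl (fun m cc => pvMergeP m (bl cc)) M).Perm (M ++ codes.flatMap bl) := by
  intro codes
  induction codes with
  | nil => intro M hM; exact ⟨hM, by simp⟩
  | cons c cs ih =>
    intro M hM
    rw [List.foldl_cons]
    obtain ⟨hpw, hperm⟩ := ih (pvMergeP M (bl c)) (pvMergeP_pairwise M (bl c) hM (hbl c))
    refine ⟨hpw, ?_⟩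
    rw [List.flatMap_cons, ← List.append_assoc]
    exact hperm.trans ((pvMergeP_perm M (bl c)).append_right _)

theorem pvFlatMap_perm {α β : Type} (l : List α) (f g : α → List β)
    (h : ∀ a ∈ l, (f a).Perm (g a)) : (l.flatMap f).Perm (l.flatMap g) := by
  induction l with
  | nil => simp
  | cons a t ih =>
    simp only [List.flatMap_cons]
    exact (h a (by simp)).append (ih (fun b hb => h b (by simp [hb])))

theorem pvBalt_foldl (profile : String) (geonames_cities : List (String × List (List (String × String)))) (airport_cities : List (String × List String)) :
    ∀ (codes : List String) (M : List (String × String)),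
      codes.foldl (fun out country_code =>
        pvMergeRows out
          ((PySem.List.sorted (pvChosenNames profile country_code geonames_cities airport_cities) (fun n => n) false).map
            (fun n => [("country_code", country_code), ("name", n)]))) (M.map pvMk)
      = (codes.foldl (fun m cc =>
          pvMergeP m ((PySem.List.sorted (pvChosenNames profile cc geonames_cities airport_cities) (fun n => n) false).map
            (fun n => (cc, n)))) M).map pvMk := by
  intro codes
  induction codes with
  | nil => intro M; rfl
  | cons c cs ih =>
    intro M
    rw [List.foldl_cons, List.foldl_cons]
    have hblock : (PySem.List.sorted (pvChosenNames profile c geonames_cities airport_cities) (fun n => n) false).map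
        (fun n => ([("country_code", c), ("name", n)] : List (String × String)))
      = ((PySem.List.sorted (pvChosenNames profile c geonames_cities airport_cities) (fun n => n) false).map
          (fun n => (c, n))).map pvMk := by
      rw [List.map_map]
      exact List.map_congr_left (fun n _ => rfl)
    rw [hblock, pvMergeRows_map, ih]

-- ===== VERDICT (by name: the statement is the Claim_ definition above) =====
theorem build_city_rows_spec : Claim_equal_build_city_rows := by
  intro profile codes geos aps _dom pre
  unfold Spec_build_city_rows build_city_rows build_city_rows_alt
  simp only [pvSelected_eq, pvValues_mapV]
  simp only [PySem.List.foldl_append_eq_flatMap, List.nil_append]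
  -- A's flatMap blocks, rewritten (using Pre_) into sorted pair blocks mapped through pvMk
  have hflat : codes.flatMap (fun cc =>
        PySem.List.sorted ((pvChosen profile cc geos aps).values.map (pvRow cc))
          (fun row => (PySem.Dict.mk row).getD "name" "") false)
      = (codes.flatMap (fun cc =>
          PySem.List.sorted ((pvChosenNames profile cc geos aps).map (fun n => (cc, n)))
            (fun p => p.2) false)).map pvMk := by
    rw [List.map_flatMap]
    apply List.flatMap_congr
    intro cc hcc
    rw [pvChosen_values profile cc geos aps (pre cc hcc).1]
    have hmap : (pvChosenNames profile cc geos aps).map (pvRow cc)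
        = ((pvChosenNames profile cc geos aps).map (fun n => (cc, n))).map pvMk := by
      rw [List.map_map]
      exact List.map_congr_left (fun n _ => rfl)
    rw [hmap, pvSorted_map_snd]
  rw [hflat, pvSorted2_map_toLex]
  -- B's fold of merges, transported to the pair level
  rw [show ([] : List (List (String × String))) = ([] : List (String × String)).map pvMk from rfl,
    pvBalt_foldl]
  apply congrArg (List.map pvMk)
  -- both pair-level lists are sorted by the lexicographic key and permutations of the same multiset
  have hblpw : ∀ cc, ((PySem.List.sorted (pvChosenNames profile cc geos aps) (fun n => n) false).map
      (fun n => (cc, n))).Pairwise (fun a b => toLex a ≤ toLex b) := by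
    intro cc
    exact (PySem.List.sorted_pairwise (pvChosenNames profile cc geos aps) (fun n => n)).map _
      (fun a b hab => Prod.Lex.toLex_le_toLex.mpr (Or.inr ⟨rfl, hab⟩))
  obtain ⟨hpw2, hperm2⟩ := pvFoldMerge _ hblpw codes [] List.Pairwise.nil
  have hSperm : (codes.flatMap (fun cc =>
        PySem.List.sorted ((pvChosenNames profile cc geos aps).map (fun n => (cc, n)))
          (fun p => p.2) false)).Perm
      (codes.flatMap (fun cc =>
        (PySem.List.sorted (pvChosenNames profile cc geos aps) (fun n => n) false).map
          (fun n => (cc, n)))) :=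
    pvFlatMap_perm codes _ _ (fun cc _ =>
      (PySem.List.sorted_perm _ _ _).trans
        (((PySem.List.sorted_perm (pvChosenNames profile cc geos aps) (fun n => n) false).map
          (fun n => (cc, n))).symm))
  refine PySem.List.eq_of_perm_of_pairwise_le_of_injective (fun p => toLex p)
    (fun a b hh => hh) ?_ (PySem.List.sorted_pairwise _ _) hpw2
  exact (PySem.List.sorted_perm _ _ _).trans (hSperm.trans (by simpa using hperm2.symm))
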